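-- pv_equiv track=rewrite | github.com/nyrkik/quantum-pools | app/src/services/inspection/pdf_extractor.py | _parse_labeled_fields
-- ===== SOURCE A (Python) =====
-- def _parse_labeled_fields(lines: list[str]) -> dict[str, str]:
--     """Parse the PDF's label/value structure into a dict.
--
--     The PDF has patterns like:
--         Label Name
--         Value
--     where the label is a known field name and the next non-empty line is the value.
--     """
--     known_labels = {
--         "Date Entered", "Permit Holder", "Facility Name", "Facility Address",
--         "Facility City", "Facility ZIP", "Phone Number", "Establishment ID",
--         "Permit ID", "Type", "Purpose", "Prog Identifier",
--         "Free Chlorine", "Combined Chlorine", "pH", "CYA",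
--         "Pool/Spa Temp", "Flow rate", "RP Gauge", "RV Gauge",
--         "BP Gauge", "BV Gauge", "UV Output",
--         "RP-Make", "RP-Model", "RP-HP", "BP-Make", "BP-Model", "BP-HP",
--         "Filter - Type", "Filter-Make", "Filter-Model", "Filter-Cleaning Method",
--         "DF-Type", "DF-Make",
--         "Inspector", "Co-Inspector", "Insp Phone", "Accepted By", "Reviewed",
--         "Pool Equipment",
--     }
--     # Build lookup (case-insensitive)
--     label_map = {l.lower(): l for l in known_labels}
--
--     fields: dict[str, str] = {}
--     for i, line in enumerate(lines):
--         stripped = line.strip()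
--         key = label_map.get(stripped.lower())
--         if key and key not in fields:
--             # Value is on the next non-empty line
--             for j in range(i + 1, min(i + 4, len(lines))):
--                 val = lines[j].strip()
--                 if not val:
--                     continue
--                 # Skip if the next line is another known label
--                 if val.lower() in label_map:
--                     break
--                 # Skip page markers
--                 if val.startswith("Pag") or val.startswith("Tota"):
--                     break
--                 fields[key] = val
--                 break
--
--     return fields
-- ===== SOURCE B (Python) =====
-- def _parse_labeled_fields(lines: list[str]) -> dict[str, str]:
--     """Parse the PDF's label/value structure into a dict.
--
--     Single forward pass: instead of an inner 3-line look-ahead per label,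
--     carry a 'pending' (key, expiry-index) state and resolve it as the pass
--     reaches the candidate value lines.
--     """
--     known_labels = {
--         "Date Entered", "Permit Holder", "Facility Name", "Facility Address",
--         "Facility City", "Facility ZIP", "Phone Number", "Establishment ID",
--         "Permit ID", "Type", "Purpose", "Prog Identifier",
--         "Free Chlorine", "Combined Chlorine", "pH", "CYA",
--         "Pool/Spa Temp", "Flow rate", "RP Gauge", "RV Gauge",
--         "BP Gauge", "BV Gauge", "UV Output",
--         "RP-Make", "RP-Model", "RP-HP", "BP-Make", "BP-Model", "BP-HP",
--         "Filter - Type", "Filter-Make", "Filter-Model", "Filter-Cleaning Method",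
--         "DF-Type", "DF-Make",
--         "Inspector", "Co-Inspector", "Insp Phone", "Accepted By", "Reviewed",
--         "Pool Equipment",
--     }
--     label_map = {l.lower(): l for l in known_labels}
--
--     fields: dict[str, str] = {}
--     pending = None  # (key, expiry_index): key's value may come from a line before expiry_index
--     for i, line in enumerate(lines):
--         stripped = line.strip()
--         low = stripped.lower()
--         if pending is not None:
--             key, expiry = pending
--             if i >= expiry:
--                 pending = None
--             elif stripped:
--                 if low in label_map or stripped.startswith("Pag") or stripped.startswith("Tota"):
--                     pending = None
--                 else:
--                     fields[key] = stripped
--                     pending = None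
--         k = label_map.get(low)
--         if k and k not in fields:
--             pending = (k, i + 4)
--     return fields
-- ===== Notes on version B (the rewrite author's own statement) =====
-- stated objective: alternative
-- what changed: Replaced A's outer loop with a bounded 3-line inner look-ahead per label by a single forward pass that carries a pending (key, expiry-index) state and resolves it as the pass reaches the candidate value lines.
import Mathlib
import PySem

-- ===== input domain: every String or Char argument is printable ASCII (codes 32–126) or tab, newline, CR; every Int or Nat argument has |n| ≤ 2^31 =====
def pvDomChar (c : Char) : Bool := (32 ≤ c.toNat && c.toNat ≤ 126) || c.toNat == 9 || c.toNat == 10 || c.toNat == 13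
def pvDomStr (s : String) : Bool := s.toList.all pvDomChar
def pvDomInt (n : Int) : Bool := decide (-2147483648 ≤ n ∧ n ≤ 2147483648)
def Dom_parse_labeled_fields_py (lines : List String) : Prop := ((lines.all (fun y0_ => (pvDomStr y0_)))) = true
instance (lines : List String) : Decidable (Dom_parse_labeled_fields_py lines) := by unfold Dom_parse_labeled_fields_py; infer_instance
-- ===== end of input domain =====

-- B replaces A's per-label bounded inner look-ahead loop with a single forward pass
-- carrying a pending (key, expiry) state; same O(n) cost, different decomposition.


-- ===== PORT A =====
-- known_labels (a Python set literal of distinct strings; the lowercased keys are all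
-- distinct, so the set's iteration order does not affect label_map's content).
def pvKnownLabels : List String :=
  ["Date Entered", "Permit Holder", "Facility Name", "Facility Address",
   "Facility City", "Facility ZIP", "Phone Number", "Establishment ID",
   "Permit ID", "Type", "Purpose", "Prog Identifier",
   "Free Chlorine", "Combined Chlorine", "pH", "CYA",
   "Pool/Spa Temp", "Flow rate", "RP Gauge", "RV Gauge",
   "BP Gauge", "BV Gauge", "UV Output",
   "RP-Make", "RP-Model", "RP-HP", "BP-Make", "BP-Model", "BP-HP",
   "Filter - Type", "Filter-Make", "Filter-Model", "Filter-Cleaning Method",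
   "DF-Type", "DF-Make",
   "Inspector", "Co-Inspector", "Insp Phone", "Accepted By", "Reviewed",
   "Pool Equipment"]

-- label_map = {l.lower(): l for l in known_labels}  (shared by both ports, as in both Pythons)
def pvLabelMap : PySem.Dict String String :=
  pvKnownLabels.foldl (fun d l => d.insert (PySem.Str.lower l) l) PySem.Dict.empty

-- A's inner loop 'for j in range(i+1, min(i+4, len(lines)))' with its breaks/continue.
def pvLookA (lines : List String) (key : String) (fields : PySem.Dict String String) :
    List Int → PySem.Dict String String
  | [] => fields
  | j :: rest =>
    let val := PySem.Str.strip (PySem.List.pyGetD lines j "")   -- j is always in range here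
    if val = "" then pvLookA lines key fields rest              -- continue
    else if pvLabelMap.contains (PySem.Str.lower val) then fields   -- break (another label)
    else if PySem.Str.startswith val "Pag" || PySem.Str.startswith val "Tota" then fields  -- break
    else fields.insert key val                                  -- assign, break

-- A's outer 'for i, line in enumerate(lines)'.  'if key and …': no known label is the
-- empty string, so Python's truthiness of key is exactly the some/none match below.
def pvLoopA (lines : List String) (fields : PySem.Dict String String) (i : Nat) :
    PySem.Dict String String :=
  if h : i < lines.length then
    let stripped := PySem.Str.strip lines[i]
    let fields' :=
      match pvLabelMap.get? (PySem.Str.lower stripped) with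
      | some key =>
        if fields.contains key then fields
        else pvLookA lines key fields
          (PySem.List.pyRange ((i : Int) + 1) (min ((i : Int) + 4) (lines.length : Int)) 1)
      | none => fields
    pvLoopA lines fields' (i + 1)
  else fields
termination_by lines.length - i

def parse_labeled_fields_py (lines : List String) : List (String × String) :=
  (pvLoopA lines PySem.Dict.empty 0).items

-- ===== PORT B =====
-- B's single pass: state = (fields, pending); pending = some (key, expiry_index).
def pvLoopB (lines : List String) (fields : PySem.Dict String String)
    (pending : Option (String × Int)) (i : Nat) : PySem.Dict String String :=
  if h : i < lines.length then
    let stripped := PySem.Str.strip lines[i]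
    let low := PySem.Str.lower stripped
    let st :=
      match pending with
      | some (key, expiry) =>
        if (i : Int) ≥ expiry then (fields, (none : Option (String × Int)))
        else if stripped ≠ "" then
          if pvLabelMap.contains low
             || PySem.Str.startswith stripped "Pag" || PySem.Str.startswith stripped "Tota"
          then (fields, none)
          else (fields.insert key stripped, none)
        else (fields, pending)
      | none => (fields, none)
    let pend2 :=
      match pvLabelMap.get? low with
      | some k => if st.1.contains k then st.2 else some (k, (i : Int) + 4)
      | none => st.2
    pvLoopB lines st.1 pend2 (i + 1)
  else fields
termination_by lines.length - i

def parse_labeled_fields_py_alt (lines : List String) : List (String × String) :=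
  (pvLoopB lines PySem.Dict.empty none 0).items

-- ===== PRECONDITION & SPEC =====
def Spec_parse_labeled_fields_py (lines : List String) (out : List (String × String)) : Prop := out = parse_labeled_fields_py_alt lines
instance (lines : List String) (out : List (String × String)) : Decidable (Spec_parse_labeled_fields_py lines out) := by unfold Spec_parse_labeled_fields_py; infer_instance

-- ===== CLAIM (what is proved, stated in full; the proofs are below) =====
def Claim_equal_parse_labeled_fields_py : Prop := ∀ (lines : List String), Dom_parse_labeled_fields_py lines → Spec_parse_labeled_fields_py lines (parse_labeled_fields_py lines)

-- ===== LEMMAS AND PROOFS =====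

-- An already-expired pending behaves like no pending.
theorem pvLoopB_expired (lines : List String) (f : PySem.Dict String String)
    (k : String) (e : Int) (i : Nat) (he : e ≤ (i : Int)) :
    pvLoopB lines f (some (k, e)) i = pvLoopB lines f none i := by
  rw [pvLoopB, pvLoopB]
  split
  · simp only [ge_iff_le, he, if_true]
  · rfl

-- The empty stripped line is never a label.
set_option maxRecDepth 40000 in
theorem pvLabelMap_lower_empty : pvLabelMap.get? (PySem.Str.lower "") = none := by decide

-- Both conjuncts of the invariant in the terminated case.
theorem pvBase (lines : List String) (i : Nat) (hge : lines.length ≤ i) :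
    (∀ f, pvLoopB lines f none i = pvLoopA lines f i) ∧
    (∀ (k : String) (e : Int), (i : Int) < e → e ≤ (i : Int) + 3 → ∀ f,
      pvLoopB lines f (some (k, e)) i
        = pvLoopA lines
            (pvLookA lines k f (PySem.List.pyRange (i : Int) (min e (lines.length : Int)) 1)) i) := by
  have hn : ¬ i < lines.length := by omega
  constructor
  · intro f; rw [pvLoopB, pvLoopA]; simp [hn]
  · intro k e h1 h2 f
    rw [pvLoopB, pvLoopA]
    rw [PySem.List.pyRange_one_eq_nil (by omega : min e (lines.length : Int) ≤ (i : Int))]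
    simp [hn, pvLookA]

set_option maxHeartbeats 1000000 in
-- Combined invariant: with no pending the passes agree; with a live pending (expiry e,
-- i < e ≤ i+3) B's continuation equals A's continuation after A's finished look-ahead.
theorem pvMain (lines : List String) : ∀ n i : Nat, lines.length ≤ i + n →
    (∀ f, pvLoopB lines f none i = pvLoopA lines f i) ∧
    (∀ (k : String) (e : Int), (i : Int) < e → e ≤ (i : Int) + 3 → ∀ f,
      pvLoopB lines f (some (k, e)) i
        = pvLoopA lines
            (pvLookA lines k f (PySem.List.pyRange (i : Int) (min e (lines.length : Int)) 1)) i) := by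
  intro n
  induction n with
  | zero => intro i hle; exact pvBase lines i (by omega)
  | succ n ih =>
    intro i hle
    by_cases h : i < lines.length
    · have IH := ih (i + 1) (by omega)
      have hcast : ((i + 1 : Nat) : Int) = (i : Int) + 1 := by push_cast; ring
      have hsget : PySem.Str.strip (PySem.List.pyGetD lines (i : Int) "")
          = PySem.Str.strip lines[i] := by
        rw [PySem.List.pyGetD_natCast, List.getD_eq_getElem lines "" h]
      constructor
      · -- L: no pending
        intro f
        rw [pvLoopB, pvLoopA]
        simp only [dif_pos h]
        cases hmap : pvLabelMap.get? (PySem.Str.lower (PySem.Str.strip lines[i])) with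
        | none => exact IH.1 f
        | some key =>
          by_cases hc : f.contains key
          · simp only [hc, if_true]; exact IH.1 f
          · simp only [Bool.not_eq_true] at hc
            simp only [hc, Bool.false_eq_true, if_false]
            rw [IH.2 key ((i : Int) + 4) (by omega) (by push_cast; omega) f, hcast]
      · -- M: live pending
        intro k e h1 h2 f
        rw [PySem.List.pyRange_one_cons (by omega : (i : Int) < min e (lines.length : Int))]
        rw [pvLoopB, pvLookA]
        simp only [dif_pos h, hsget]
        have hne : ¬ (i : Int) ≥ e := by omega
        by_cases hs : PySem.Str.strip lines[i] = ""
        · -- empty line: pending survives, look-ahead continues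
          have hmap : pvLabelMap.get? (PySem.Str.lower (PySem.Str.strip lines[i])) = none := by
            rw [hs]; exact pvLabelMap_lower_empty
          rw [if_neg hne, if_neg (show ¬ (PySem.Str.strip lines[i] ≠ "") from by simp [hs]),
            if_pos hs]
          simp only [hmap]
          rw [pvLoopA]
          simp only [dif_pos h, hmap]
          by_cases he : e ≤ (i : Int) + 1
          · rw [pvLoopB_expired lines f k e (i + 1) (by push_cast; omega)]
            rw [PySem.List.pyRange_one_eq_nil
              (by omega : min e (lines.length : Int) ≤ (i : Int) + 1)]
            exact IH.1 f
          · rw [IH.2 k e (by push_cast; omega) (by push_cast; omega) f, hcast]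
        · -- non-empty line
          by_cases hlab : pvLabelMap.contains (PySem.Str.lower (PySem.Str.strip lines[i])) = true
          · -- it is a label: A breaks; B drops the pending and may start a new one
            obtain ⟨key, hmap⟩ : ∃ key,
                pvLabelMap.get? (PySem.Str.lower (PySem.Str.strip lines[i])) = some key := by
              rw [PySem.Dict.contains_eq_isSome_get?] at hlab
              exact Option.isSome_iff_exists.mp hlab
            simp only [hne, if_false, hs, ne_eq, not_false_eq_true, if_true, hlab,
              Bool.true_or, hmap]
            rw [pvLoopA]
            simp only [dif_pos h, hmap]
            by_cases hc : f.contains key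
            · simp only [hc, if_true]; exact IH.1 f
            · simp only [Bool.not_eq_true] at hc
              simp only [hc, Bool.false_eq_true, if_false]
              rw [IH.2 key ((i : Int) + 4) (by omega) (by push_cast; omega) f, hcast]
          · have hmap : pvLabelMap.get? (PySem.Str.lower (PySem.Str.strip lines[i])) = none := by
              rw [PySem.Dict.contains_eq_isSome_get?] at hlab
              exact Option.not_isSome_iff_eq_none.mp hlab
            have hlab' : pvLabelMap.contains (PySem.Str.lower (PySem.Str.strip lines[i])) = false := by
              simpa using hlab
            by_cases hpg : (PySem.Str.startswith (PySem.Str.strip lines[i]) "Pag"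
                || PySem.Str.startswith (PySem.Str.strip lines[i]) "Tota") = true
            · -- page marker: A breaks, B drops the pending
              simp only [hne, if_false, hs, ne_eq, not_false_eq_true, if_true, hlab',
                Bool.false_or, hpg, hmap]
              rw [pvLoopA]
              simp only [dif_pos h, hmap]
              exact IH.1 f
            · -- a value: both assign it to the pending key
              have hpg0 : (PySem.Str.startswith (PySem.Str.strip lines[i]) "Pag"
                  || PySem.Str.startswith (PySem.Str.strip lines[i]) "Tota") = false := by
                simpa using hpg
              simp only [if_neg hne, if_pos hs, if_neg hs, hlab', Bool.false_or, hpg0,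
                Bool.false_eq_true, if_false, hmap]
              rw [pvLoopA]
              simp only [dif_pos h, hmap]
              exact IH.1 _
    · exact pvBase lines i (by omega)

-- ===== VERDICT (by name: the statement is the Claim_ definition above) =====
theorem parse_labeled_fields_py_spec : Claim_equal_parse_labeled_fields_py := by
  intro lines _
  unfold Spec_parse_labeled_fields_py parse_labeled_fields_py parse_labeled_fields_py_alt
  rw [(pvMain lines lines.length 0 (by omega)).1]
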